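-- pv_equiv track=rewrite | github.com/adii55689/Scan-Utility | Appsec Scan Utility/Appsec_Repo_Search.py | _first_unquoted_marker_index
-- ===== SOURCE A (Python) =====
-- def _first_unquoted_marker_index(line, markers):
--     n = len(line)
--     i = 0
--     in_squote = False
--     in_dquote = False
--     escape = False
--     markers_sorted = sorted(markers, key=lambda m: -len(m))
--     while i < n:
--         ch = line[i]
--         if escape:
--             escape = False
--             i += 1
--             continue
--         if ch == "\\":
--             escape = True
--             i += 1
--             continue
--         if not in_dquote and ch == "'" and not in_squote:
--             in_squote = True; i += 1; continue
--         elif in_squote and ch == "'" and not escape: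
--             in_squote = False; i += 1; continue
--         if not in_squote and ch == '"' and not in_dquote:
--             in_dquote = True; i += 1; continue
--         elif in_dquote and ch == '"' and not escape:
--             in_dquote = False; i += 1; continue
--         if not in_squote and not in_dquote:
--             for m in markers_sorted:
--                 L = len(m)
--                 if i + L <= n and line[i:i+L] == m:
--                     return i, m
--         i += 1
--     return -1, None
-- ===== SOURCE B (Python) =====
-- def _first_unquoted_marker_index(line, markers):
--     # Pass 1: quote/escape state machine only, marking positions where A would test markers.
--     n = len(line)
--     checked = [False] * n
--     i = 0
--     sq = dq = False
--     while i < n: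
--         ch = line[i]
--         if ch == "\\":
--             i += 2  # backslash and the escaped char are both skipped
--             continue
--         if not dq and ch == "'" and not sq:
--             sq = True
--         elif sq and ch == "'":
--             sq = False
--         elif not sq and ch == '"' and not dq:
--             dq = True
--         elif dq and ch == '"':
--             dq = False
--         elif not sq and not dq:
--             checked[i] = True
--         i += 1
--     # Pass 2: try markers (longest first) at each checked position.
--     ms = sorted(markers, key=lambda m: -len(m))
--     for i in range(n):
--         if checked[i]:
--             for m in ms:
--                 if line[i:i + len(m)] == m:
--                     return i, m
--     return -1, None
-- ===== Notes on version B (the rewrite author's own statement) =====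
-- stated objective: alternative
-- what changed: Replaces A's fused single-pass scan by two passes: a quote/escape state machine first builds a boolean mask of positions eligible for marker matching, then a separate scan tries the length-sorted markers at each masked position, dropping the explicit i+L<=n guard in favour of slice comparison.
import Mathlib
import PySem

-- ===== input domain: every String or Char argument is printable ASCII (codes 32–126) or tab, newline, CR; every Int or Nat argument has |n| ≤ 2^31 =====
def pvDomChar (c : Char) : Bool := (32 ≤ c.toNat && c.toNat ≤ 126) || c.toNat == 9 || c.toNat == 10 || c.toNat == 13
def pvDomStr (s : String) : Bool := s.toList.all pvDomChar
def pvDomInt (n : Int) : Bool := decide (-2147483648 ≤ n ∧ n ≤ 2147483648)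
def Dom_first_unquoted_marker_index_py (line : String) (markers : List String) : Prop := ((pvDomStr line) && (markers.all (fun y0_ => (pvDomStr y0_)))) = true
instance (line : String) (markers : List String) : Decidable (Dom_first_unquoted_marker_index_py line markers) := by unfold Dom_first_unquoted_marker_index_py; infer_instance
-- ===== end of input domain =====

-- B replaces A's fused single-pass quote-tracking scan by two passes (a quote/escape mask
-- pass, then a separate marker-matching scan); objective: alternative decomposition, not speed.

-- ===== PORT A =====
-- inner 'for m in markers_sorted: if i + L <= n and line[i:i+L] == m: return i, m'
-- (len(m) is m.toList.length; the slice is the exact PySem slice primitive)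
def pvInnerA (chars : List Char) (n : Nat) (msS : List String) (i : Nat) : Option String :=
  msS.find? (fun m =>
    decide (i + m.toList.length ≤ n) &&
      (PySem.List.slice chars (some (i : Int)) (some ((i : Int) + (m.toList.length : Int))) == m.toList))

-- the while loop of A: rest = line[i:], state (i, in_squote, in_dquote, escape)
def pvLoopA (chars : List Char) (n : Nat) (msS : List String) :
    List Char → Nat → Bool → Bool → Bool → Int × Option String
  | [], _, _, _, _ => (-1, none)
  | ch :: rest, i, sq, dq, esc =>
    if esc then pvLoopA chars n msS rest (i + 1) sq dq false
    else if ch = '\\' then pvLoopA chars n msS rest (i + 1) sq dq true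
    else if !dq && ch = '\'' && !sq then pvLoopA chars n msS rest (i + 1) true dq false
    else if sq && ch = '\'' && !esc then pvLoopA chars n msS rest (i + 1) false dq false
    else if !sq && ch = '"' && !dq then pvLoopA chars n msS rest (i + 1) sq true false
    else if dq && ch = '"' && !esc then pvLoopA chars n msS rest (i + 1) sq false false
    else if !sq && !dq then
      match pvInnerA chars n msS i with
      | some m => ((i : Int), some m)
      | none => pvLoopA chars n msS rest (i + 1) sq dq false
    else pvLoopA chars n msS rest (i + 1) sq dq false

def first_unquoted_marker_index_py (line : String) (markers : List String) : Int × Option String :=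
  let chars := line.toList
  let n := chars.length
  let msS := PySem.List.sorted markers (fun m => -(m.toList.length : Int)) false
  pvLoopA chars n msS chars 0 false false false

-- ===== PORT B =====
-- pass 1 of Source B: the quote/escape state machine, producing the 'checked' mask
def pvMaskB : List Char → Bool → Bool → List Bool
  | [], _, _ => []
  | ch :: rest, sq, dq =>
    if ch = '\\' then
      match rest with
      | [] => [false]                          -- i += 2 runs past the end
      | _ :: rest' => false :: false :: pvMaskB rest' sq dq
    else if !dq && ch = '\'' && !sq then false :: pvMaskB rest true dq
    else if sq && ch = '\'' then false :: pvMaskB rest false dq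
    else if !sq && ch = '"' && !dq then false :: pvMaskB rest sq true
    else if dq && ch = '"' then false :: pvMaskB rest sq false
    else if !sq && !dq then true :: pvMaskB rest sq dq
    else false :: pvMaskB rest sq dq

-- inner 'for m in ms: if line[i:i+len(m)] == m: return i, m' of pass 2
def pvInnerB (chars : List Char) (msS : List String) (i : Nat) : Option String :=
  msS.find? (fun m =>
    PySem.List.slice chars (some (i : Int)) (some ((i : Int) + (m.toList.length : Int))) == m.toList)

-- pass 2 of Source B: 'for i in range(n): if checked[i]: …', walking the mask with its index
def pvScanB (chars : List Char) (msS : List String) : List Bool → Nat → Int × Option String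
  | [], _ => (-1, none)
  | b :: bs, i =>
    if b then
      match pvInnerB chars msS i with
      | some m => ((i : Int), some m)
      | none => pvScanB chars msS bs (i + 1)
    else pvScanB chars msS bs (i + 1)

def first_unquoted_marker_index_py_alt (line : String) (markers : List String) : Int × Option String :=
  let chars := line.toList
  let msS := PySem.List.sorted markers (fun m => -(m.toList.length : Int)) false
  pvScanB chars msS (pvMaskB chars false false) 0

-- ===== PRECONDITION & SPEC =====
def Spec_first_unquoted_marker_index_py (line : String) (markers : List String) (out : Int × Option String) : Prop := out = first_unquoted_marker_index_py_alt line markers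
instance (line : String) (markers : List String) (out : Int × Option String) : Decidable (Spec_first_unquoted_marker_index_py line markers out) := by unfold Spec_first_unquoted_marker_index_py; infer_instance

-- ===== CLAIM (what is proved, stated in full; the proofs are below) =====
def Claim_equal_first_unquoted_marker_index_py : Prop := ∀ (line : String) (markers : List String), Dom_first_unquoted_marker_index_py line markers → Spec_first_unquoted_marker_index_py line markers (first_unquoted_marker_index_py line markers)

-- ===== LEMMAS AND PROOFS =====

-- A's guard 'i + L ≤ n' is redundant at i < n: a truncated slice has the wrong length.
theorem pvInner_eq (chars : List Char) (msS : List String) (i : Nat) (hi : i < chars.length) :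
    pvInnerA chars chars.length msS i = pvInnerB chars msS i := by
  unfold pvInnerA pvInnerB
  congr 1
  funext m
  rw [PySem.List.slice_natCast_add]
  by_cases hle : i + m.toList.length ≤ chars.length
  · simp only [hle, decide_true, Bool.true_and]
  · simp only [hle, decide_false, Bool.false_and]
    symm
    rw [beq_eq_false_iff_ne]
    intro heq
    have := congrArg List.length heq
    simp only [List.length_take, List.length_drop] at this
    omega

theorem pvLoop_eq (chars : List Char) (msS : List String) :
    ∀ k (rest : List Char), rest.length = k → ∀ (i : Nat) (sq dq : Bool),
      i + rest.length = chars.length →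
      pvLoopA chars chars.length msS rest i sq dq false =
        pvScanB chars msS (pvMaskB rest sq dq) i := by
  intro k
  induction k using Nat.strong_induction_on with
  | _ k ih =>
    intro rest hk i sq dq hlen
    match rest with
    | [] => simp [pvLoopA, pvMaskB, pvScanB]
    | ch :: rest' =>
      have hi : i < chars.length := by simp at hlen; omega
      by_cases hbs : ch = '\\'
      · subst hbs
        match rest' with
        | [] =>
          simp only [pvLoopA, pvMaskB, pvScanB, if_true]
          simp
        | c :: rest'' =>
          simp only [pvLoopA, pvMaskB, if_true, Bool.false_eq_true, reduceIte]
          rw [show pvScanB chars msS (false :: false :: pvMaskB rest'' sq dq) i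
                = pvScanB chars msS (pvMaskB rest'' sq dq) (i + 1 + 1) from by
              simp [pvScanB]]
          exact ih rest''.length (by simp at hk; omega) rest'' rfl (i + 1 + 1) sq dq
            (by simp at hlen ⊢; omega)
      · have step : ∀ (sq' dq' : Bool), rest'.length < k →
            pvLoopA chars chars.length msS rest' (i + 1) sq' dq' false =
              pvScanB chars msS (pvMaskB rest' sq' dq') (i + 1) :=
          fun sq' dq' h => ih rest'.length h rest' rfl (i + 1) sq' dq'
            (by simp at hlen ⊢; omega)
        have hk' : rest'.length < k := by simp at hk; omega
        simp only [pvLoopA, Bool.false_eq_true, reduceIte, if_neg hbs]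
        by_cases h1 : (!dq && ch = '\'' && !sq) = true
        · rw [show pvMaskB (ch :: rest') sq dq = false :: pvMaskB rest' true dq from by
              conv_lhs => rw [pvMaskB.eq_def]
              simp [hbs, h1]]
          simp [h1, pvScanB, step _ _ hk']
        · simp only [h1, Bool.false_eq_true, reduceIte]
          by_cases h2 : (sq && ch = '\'') = true
          · rw [show pvMaskB (ch :: rest') sq dq = false :: pvMaskB rest' false dq from by
                conv_lhs => rw [pvMaskB.eq_def]
                simp [hbs, h1, h2]]
            simp [h2, pvScanB, step _ _ hk']
          · simp only [h2, Bool.not_false, Bool.and_true, Bool.false_eq_true, reduceIte]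
            by_cases h3 : (!sq && ch = '"' && !dq) = true
            · rw [show pvMaskB (ch :: rest') sq dq = false :: pvMaskB rest' sq true from by
                  conv_lhs => rw [pvMaskB.eq_def]
                  simp [hbs, h1, h2, h3]]
              simp [h3, pvScanB, step _ _ hk']
            · simp only [h3, Bool.false_eq_true, reduceIte]
              by_cases h4 : (dq && ch = '"') = true
              · rw [show pvMaskB (ch :: rest') sq dq = false :: pvMaskB rest' sq false from by
                    conv_lhs => rw [pvMaskB.eq_def]
                    simp [hbs, h1, h2, h3, h4]]
                simp [h4, pvScanB, step _ _ hk']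
              · simp only [h4, Bool.false_eq_true, reduceIte]
                by_cases h5 : (!sq && !dq) = true
                · rw [show pvMaskB (ch :: rest') sq dq = true :: pvMaskB rest' sq dq from by
                      conv_lhs => rw [pvMaskB.eq_def]
                      simp [hbs, h1, h2, h3, h4, h5]]
                  simp only [h5, if_true, pvScanB, pvInner_eq chars msS i hi]
                  cases pvInnerB chars msS i with
                  | none => simp [step _ _ hk']
                  | some m => simp
                · rw [show pvMaskB (ch :: rest') sq dq = false :: pvMaskB rest' sq dq from by
                      conv_lhs => rw [pvMaskB.eq_def]
                      simp [hbs, h1, h2, h3, h4, h5]]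
                  simp [h5, pvScanB, step _ _ hk']

-- ===== VERDICT (by name: the statement is the Claim_ definition above) =====
theorem first_unquoted_marker_index_py_spec : Claim_equal_first_unquoted_marker_index_py := by
  intro line markers _
  unfold Spec_first_unquoted_marker_index_py first_unquoted_marker_index_py
    first_unquoted_marker_index_py_alt
  exact pvLoop_eq line.toList _ line.toList.length line.toList rfl 0 false false (by simp)
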